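-- pv_equiv track=rewrite | github.com/vksmadheshiya/PPT | Data Structures/assignment_1_Arrays.py | remove_duplicate_with_original
-- ===== SOURCE A (Python) =====
-- def remove_duplicate_with_original(s:list[int]) -> bool:
--     unique = set()
--     missing_list = []
--
--     for i in range(len(s)):
--         if s[i] in unique:
--             missing_list = [i, (s[i+1] + s[i-1]) // 2]
--         else:
--             unique.add(s[i])
--     return missing_list
-- ===== SOURCE B (Python) =====
-- def remove_duplicate_with_original(s: list[int]) -> bool:
--     # Reverse scan: the first (largest) index whose value already occurred
--     # earlier is exactly the last-overwrite result of the forward pass.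
--     for i in range(len(s) - 1, -1, -1):
--         if s[i] in s[:i]:
--             return [i, (s[i + 1] + s[i - 1]) // 2]
--     return []
-- ===== Notes on version B (the rewrite author's own statement) =====
-- stated objective: alternative
-- what changed: Replaces the forward pass that maintains a seen-set and overwrites the answer at every duplicate with a reverse scan that returns at the first (largest) index whose value occurs earlier in the list, with no set and no accumulator.
-- outside the precondition, e.g. on remove_duplicate_with_original([1, 2, 1]): A raises IndexError, B raises IndexError
import Mathlib
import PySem

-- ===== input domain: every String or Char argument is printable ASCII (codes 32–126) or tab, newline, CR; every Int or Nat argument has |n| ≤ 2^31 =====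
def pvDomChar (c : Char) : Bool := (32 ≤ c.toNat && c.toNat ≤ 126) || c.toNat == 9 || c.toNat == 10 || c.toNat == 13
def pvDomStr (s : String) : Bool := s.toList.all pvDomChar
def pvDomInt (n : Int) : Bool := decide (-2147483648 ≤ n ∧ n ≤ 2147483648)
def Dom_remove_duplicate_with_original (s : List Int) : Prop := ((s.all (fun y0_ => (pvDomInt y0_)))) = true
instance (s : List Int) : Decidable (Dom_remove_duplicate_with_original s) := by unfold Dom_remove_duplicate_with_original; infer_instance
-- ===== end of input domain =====

-- B replaces A's forward pass with a seen-set and last-overwrite accumulator by a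
-- reverse scan returning at the first (largest) index whose value occurs earlier (objective: alternative).


-- ===== PORT A =====
-- one iteration of A's loop body; s[i+1]/s[i-1] use pyGet? (none = IndexError, excluded by Pre_; .getD 0 is never the value returned inside Pre_)
def pvAStep (s : List Int) (st : PySem.Set Int × List Int) (i : Nat) : PySem.Set Int × List Int :=
  let x := (PySem.List.pyGet? s (i : Int)).getD 0
  if PySem.Set.contains st.1 x then
    (st.1, [(i : Int), PySem.Int.floordiv ((PySem.List.pyGet? s ((i : Int) + 1)).getD 0
                                           + (PySem.List.pyGet? s ((i : Int) - 1)).getD 0) 2])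
  else
    (PySem.Set.add st.1 x, st.2)

def remove_duplicate_with_original (s : List Int) : List Int :=
  ((List.range s.length).foldl (pvAStep s) (PySem.Set.empty, ([] : List Int))).2

-- ===== PORT B =====
-- reverse loop: argument n+1 means "next index to test is n"; s[:i] with 0 ≤ i is List.take i
def pvBLoop (s : List Int) : Nat → List Int
  | 0 => []
  | n + 1 =>
    let x := (PySem.List.pyGet? s (n : Int)).getD 0
    if (s.take n).contains x then
      [(n : Int), PySem.Int.floordiv ((PySem.List.pyGet? s ((n : Int) + 1)).getD 0
                                      + (PySem.List.pyGet? s ((n : Int) - 1)).getD 0) 2]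
    else pvBLoop s n

def remove_duplicate_with_original_alt (s : List Int) : List Int :=
  pvBLoop s s.length

-- ===== PRECONDITION & SPEC =====
-- Pre_ excludes exactly the inputs whose LAST element already occurs earlier in the list:
-- there both Pythons raise IndexError (s[i+1] with i = len(s)-1).
def Pre_remove_duplicate_with_original (s : List Int) : Prop :=
  (s.getLast?.all (fun x => !(s.dropLast.contains x))) = true
instance (s : List Int) : Decidable (Pre_remove_duplicate_with_original s) := by
  unfold Pre_remove_duplicate_with_original; infer_instance
def pvWitness_remove_duplicate_with_original : List Int := [1, 2, 2, 3]

def Spec_remove_duplicate_with_original (s : List Int) (out : List Int) : Prop := out = remove_duplicate_with_original_alt s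
instance (s : List Int) (out : List Int) : Decidable (Spec_remove_duplicate_with_original s out) := by unfold Spec_remove_duplicate_with_original; infer_instance

-- ===== CLAIM (what is proved, stated in full; the proofs are below) =====
def Claim_equal_remove_duplicate_with_original : Prop := ∀ (s : List Int), Dom_remove_duplicate_with_original s → Pre_remove_duplicate_with_original s → Spec_remove_duplicate_with_original s (remove_duplicate_with_original s)

-- ===== LEMMAS AND PROOFS =====

-- A's seen-set after the first n iterations has exactly the members of s.take n
theorem pvA_set_mem (s : List Int) (n : Nat) (hn : n ≤ s.length) : ∀ (x : Int),
    x ∈ ((List.range n).foldl (pvAStep s) (PySem.Set.empty, ([] : List Int))).1 ↔ x ∈ s.take n := by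
  induction n with
  | zero => simp [PySem.Set.empty]
  | succ m ih =>
    have hm : m ≤ s.length := Nat.le_of_succ_le hn
    have hmlt : m < s.length := hn
    have htake : s.take (m + 1) = s.take m ++ [s[m]] := by
      rw [List.take_add_one]; simp [List.getElem?_eq_getElem hmlt]
    intro x
    rw [List.range_succ, List.foldl_append]
    simp only [List.foldl_cons, List.foldl_nil, pvAStep,
      PySem.List.pyGet?_natCast, List.getElem?_eq_getElem hmlt, Option.getD_some]
    split_ifs with h
    · have hmem : s[m] ∈ s.take m := (ih hm s[m]).mp ((PySem.Set.contains_iff _ _).mp h)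
      rw [ih hm x, htake]
      simp only [List.mem_append, List.mem_singleton]
      constructor
      · intro hx; exact Or.inl hx
      · rintro (hx | rfl)
        · exact hx
        · exact hmem
    · rw [htake, PySem.Set.mem_add, ih hm x]
      simp only [List.mem_append, List.mem_singleton]

-- B's loop agrees with A's accumulator at every prefix length
theorem pvAB_loop (s : List Int) (n : Nat) (hn : n ≤ s.length) :
    ((List.range n).foldl (pvAStep s) (PySem.Set.empty, ([] : List Int))).2 = pvBLoop s n := by
  induction n with
  | zero => simp [pvBLoop]
  | succ m ih =>
    have hm : m ≤ s.length := Nat.le_of_succ_le hn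
    rw [List.range_succ, List.foldl_append]
    simp only [List.foldl_cons, List.foldl_nil, pvAStep, pvBLoop]
    have hcent : PySem.Set.contains ((List.range m).foldl (pvAStep s) (PySem.Set.empty, ([] : List Int))).1
        ((PySem.List.pyGet? s (m : Int)).getD 0)
        = (s.take m).contains ((PySem.List.pyGet? s (m : Int)).getD 0) := by
      have hiff := pvA_set_mem s m hm ((PySem.List.pyGet? s (m : Int)).getD 0)
      rw [Bool.eq_iff_iff]
      simp only [PySem.Set.contains_eq_listContains, List.contains_iff_mem]
      exact hiff
    rw [hcent]
    split_ifs with h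
    · rfl
    · exact ih hm

-- ===== VERDICT (by name: the statement is the Claim_ definition above) =====
theorem remove_duplicate_with_original_spec : Claim_equal_remove_duplicate_with_original := by
  intro s _ _
  unfold Spec_remove_duplicate_with_original remove_duplicate_with_original remove_duplicate_with_original_alt
  exact pvAB_loop s s.length le_rfl
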